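-- pv_equiv track=rewrite | github.com/rakhigauttam83-png/safelink-check-2026 | app.py | is_typosquatting
-- ===== SOURCE A (Python) =====
-- def normalize_leetspeak(label: str) -> str:
--     replacements = str.maketrans({
--         '0': 'o',
--         '1': 'l',
--         '3': 'e',
--         '4': 'a',
--         '5': 's',
--         '7': 't',
--         '$': 's',
--         '@': 'a',
--     })
--     return label.lower().translate(replacements)
--
-- def edit_distance(a: str, b: str) -> int:
--     a, b = a.lower(), b.lower()
--     if a == b:
--         return 0
--     if len(a) < len(b):
--         a, b = b, a
--     previous_row = list(range(len(b) + 1))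
--     for i, ca in enumerate(a, start=1):
--         current_row = [i]
--         for j, cb in enumerate(b, start=1):
--             insertions = previous_row[j] + 1
--             deletions = current_row[j - 1] + 1
--             substitutions = previous_row[j - 1] + (ca != cb)
--             current_row.append(min(insertions, deletions, substitutions))
--         previous_row = current_row
--     return previous_row[-1]
--
-- def is_typosquatting(hostname: str, brands: list[str]) -> tuple[bool, str]:
--     labels = hostname.lower().split('.')
--     if len(labels) < 2:
--         return False, ""
--     root_label = labels[-2]
--     normalized = normalize_leetspeak(root_label)
--     for brand in brands:
--         if normalized == brand:
--             if root_label != brand: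
--                 return True, f"The domain looks like a typo-squatted version of '{brand}.com'."
--             return False, ""
--         if edit_distance(normalized, brand) == 1 and normalized != brand:
--             return True, f"The domain is very similar to '{brand}.com' and may be used for typosquatting."
--     return False, ""
-- ===== SOURCE B (Python) =====
-- # B: same detection, but the per-brand full DP edit-distance table is replaced by a
-- # direct "exactly one edit away" check: one mismatch for equal lengths, one shifted
-- # scan for a single insertion/deletion.
--
-- _LEET = {'0': 'o', '1': 'l', '3': 'e', '4': 'a', '5': 's', '7': 't', '$': 's', '@': 'a'}
--
--
-- def _normalize(label):
--     return ''.join(_LEET.get(c, c) for c in label.lower())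
--
--
-- def _one_edit_away(a, b):
--     la, lb = len(a), len(b)
--     if la == lb:
--         return sum(1 for x, y in zip(a, b) if x != y) == 1
--     if la == lb + 1:
--         return _del_scan(a, b)
--     if lb == la + 1:
--         return _del_scan(b, a)
--     return False
--
--
-- def _del_scan(x, y):
--     # x is one longer than y: walk to the first mismatch, then the rest must align shifted
--     i = 0
--     while i < len(y) and x[i] == y[i]:
--         i += 1
--     return x[i + 1:] == y[i:]
--
--
-- def is_typosquatting(hostname, brands):
--     labels = hostname.lower().split('.')
--     if len(labels) < 2:
--         return False, ""
--     root_label = labels[-2]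
--     normalized = _normalize(root_label)
--     for brand in brands:
--         if normalized == brand:
--             if root_label != brand:
--                 return True, f"The domain looks like a typo-squatted version of '{brand}.com'."
--             return False, ""
--         if _one_edit_away(normalized, brand.lower()):
--             return True, f"The domain is very similar to '{brand}.com' and may be used for typosquatting."
--     return False, ""
-- ===== Notes on version B (the rewrite author's own statement) =====
-- stated objective: alternative
-- what changed: The per-brand full dynamic-programming edit-distance table is replaced by a direct 'exactly one edit away' check (mismatch count for equal lengths, one shifted scan for a single insertion/deletion), which is all the ==1 comparison needs; it trades the general distance computation for a specialised linear scan.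
import Mathlib
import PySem

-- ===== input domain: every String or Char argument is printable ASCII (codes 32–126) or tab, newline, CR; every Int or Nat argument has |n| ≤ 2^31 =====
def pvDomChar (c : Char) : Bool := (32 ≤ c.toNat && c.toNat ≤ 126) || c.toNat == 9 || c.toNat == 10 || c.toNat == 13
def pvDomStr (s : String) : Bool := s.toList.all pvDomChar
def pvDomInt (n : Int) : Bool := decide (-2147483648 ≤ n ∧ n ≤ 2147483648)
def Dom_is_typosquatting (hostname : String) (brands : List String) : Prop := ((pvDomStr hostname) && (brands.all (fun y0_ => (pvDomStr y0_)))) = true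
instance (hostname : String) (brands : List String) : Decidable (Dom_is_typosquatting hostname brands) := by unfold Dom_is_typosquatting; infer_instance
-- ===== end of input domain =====

-- B replaces A's per-brand full DP edit-distance table by a direct "exactly one edit away"
-- check (one mismatch for equal lengths, one shifted scan for a single insertion/deletion).

-- ===== PORT A =====
def leetChar (c : Char) : Char :=
  if c = '0' then 'o' else if c = '1' then 'l' else if c = '3' then 'e'
  else if c = '4' then 'a' else if c = '5' then 's' else if c = '7' then 't'
  else if c = '$' then 's' else if c = '@' then 'a' else c

def normalize_leetspeak (label : String) : String :=
  String.ofList (((PySem.Str.lower label).toList).map leetChar)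

def edit_distance (a b : String) : Int :=
  let a := PySem.Str.lower a
  let b := PySem.Str.lower b
  if a = b then 0
  else
    let p := if PySem.Str.len a < PySem.Str.len b then (b, a) else (a, b)
    let al := p.1.toList
    let bl := p.2.toList
    let row0 : List Int := PySem.List.pyRange 0 (PySem.List.len bl + 1) 1
    let last := al.zipIdx 1 |>.foldl (fun prev (pi : Char × Nat) =>
      bl.zipIdx 1 |>.foldl (fun cur (qj : Char × Nat) =>
        let ins := PySem.List.pyGetD prev (qj.2 : Int) 0 + 1
        let del := PySem.List.pyGetD cur ((qj.2 : Int) - 1) 0 + 1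
        let sub := PySem.List.pyGetD prev ((qj.2 : Int) - 1) 0 +
          (if pi.1 ≠ qj.1 then 1 else 0)
        cur ++ [min (min ins del) sub]) [(pi.2 : Int)]) row0
    PySem.List.pyGetD last (-1) 0   -- previous_row[-1]: the row is never empty (length len(b)+1)

def loopA (normalized root : String) : List String → Bool × String
  | [] => (false, "")
  | brand :: rest =>
    if normalized = brand then
      if root ≠ brand then
        (true, "The domain looks like a typo-squatted version of '" ++ brand ++ ".com'.")
      else (false, "")
    else if edit_distance normalized brand = 1 ∧ normalized ≠ brand then
      (true, "The domain is very similar to '" ++ brand ++ ".com' and may be used for typosquatting.")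
    else loopA normalized root rest

def is_typosquatting (hostname : String) (brands : List String) : Bool × String :=
  let labels := (PySem.Str.split? (PySem.Str.lower hostname) ".").getD []
  if labels.length < 2 then (false, "")
  else
    let root_label := (PySem.List.pyGet? labels (-2)).getD ""  -- labels[-2]: in range, length ≥ 2
    loopA (normalize_leetspeak root_label) root_label brands

-- ===== PORT B =====
def bLeet : PySem.Dict Char Char :=
  PySem.Dict.ofList [('0','o'),('1','l'),('3','e'),('4','a'),('5','s'),('7','t'),('$','s'),('@','a')]

def bNormalize (label : String) : String :=
  String.ofList (((PySem.Str.lower label).toList).map (fun c => bLeet.getD c c))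

def delScan : List Char → List Char → Bool
  | [], _ => false          -- unreachable: callers pass a first list one longer than the second
  | _ :: xt, [] => xt.isEmpty
  | x :: xt, y :: yt => if x = y then delScan xt yt else xt == y :: yt

def oneEditAway (a b : List Char) : Bool :=
  if a.length = b.length then ((a.zip b).countP (fun p => p.1 != p.2)) == 1
  else if a.length = b.length + 1 then delScan a b
  else if b.length = a.length + 1 then delScan b a
  else false

def loopB (normalized root : String) : List String → Bool × String
  | [] => (false, "")
  | brand :: rest =>
    if normalized = brand then
      if root ≠ brand then
        (true, "The domain looks like a typo-squatted version of '" ++ brand ++ ".com'.")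
      else (false, "")
    else if oneEditAway normalized.toList (PySem.Str.lower brand).toList then
      (true, "The domain is very similar to '" ++ brand ++ ".com' and may be used for typosquatting.")
    else loopB normalized root rest

def is_typosquatting_alt (hostname : String) (brands : List String) : Bool × String :=
  let labels := (PySem.Str.split? (PySem.Str.lower hostname) ".").getD []
  if labels.length < 2 then (false, "")
  else
    let root_label := (PySem.List.pyGet? labels (-2)).getD ""  -- labels[-2]: in range, length ≥ 2
    loopB (bNormalize root_label) root_label brands

-- ===== PRECONDITION & SPEC =====
def Spec_is_typosquatting (hostname : String) (brands : List String) (out : Bool × String) : Prop := out = is_typosquatting_alt hostname brands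
instance (hostname : String) (brands : List String) (out : Bool × String) : Decidable (Spec_is_typosquatting hostname brands out) := by unfold Spec_is_typosquatting; infer_instance

-- ===== CLAIM (what is proved, stated in full; the proofs are below) =====
def Claim_equal_is_typosquatting : Prop := ∀ (hostname : String) (brands : List String), Dom_is_typosquatting hostname brands → Spec_is_typosquatting hostname brands (is_typosquatting hostname brands)

-- ===== LEMMAS AND PROOFS =====

-- The Levenshtein table of A's DP, as a function of the two prefix lengths.
def levT (x y : List Char) : Nat → Nat → Nat
  | 0, j => j
  | i+1, 0 => i+1
  | i+1, j+1 =>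
      min (min (levT x y i (j+1) + 1) (levT x y (i+1) j + 1))
        (levT x y i j + (if x.getD i ' ' = y.getD j ' ' then 0 else 1))
termination_by i j => i + j

def agreeTo (x y : List Char) (p : Nat) : Prop := ∀ k, k < p → x.getD k ' ' = y.getD k ' '
def shiftFrom (x y : List Char) (p j : Nat) : Prop := ∀ k, p ≤ k → k < j → x.getD (k+1) ' ' = y.getD k ' '
def delShape (x y : List Char) (j : Nat) : Prop := ∃ p, p ≤ j ∧ agreeTo x y p ∧ shiftFrom x y p j
def miscount (x y : List Char) (i : Nat) : Nat := (List.range i).countP (fun k => !(x.getD k ' ' == y.getD k ' '))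

theorem miscount_zero_iff (u v : List Char) (i : Nat) : miscount u v i = 0 ↔ agreeTo u v i := by
  unfold miscount agreeTo
  rw [List.countP_eq_zero]
  constructor
  · intro h k hk
    have := h k (List.mem_range.mpr hk)
    simpa using this
  · intro h k hk
    have := h k (List.mem_range.mp hk)
    rw [List.getD_eq_getElem?_getD, List.getD_eq_getElem?_getD] at this
    simp [this]

theorem miscount_cons (c d : Char) (u v : List Char) (i : Nat) :
    miscount (c::u) (d::v) (i+1) = (if c = d then 0 else 1) + miscount u v i := by
  unfold miscount
  rw [List.range_succ_eq_map, List.countP_cons, List.countP_map]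
  have hc : List.countP ((fun k => !((c::u).getD k ' ' == (d::v).getD k ' ')) ∘ Nat.succ) (List.range i)
      = List.countP (fun k => !(u.getD k ' ' == v.getD k ' ')) (List.range i) := by
    apply List.countP_congr; intro k _
    simp [Function.comp]
  rw [hc]
  by_cases h : c = d <;> simp [h, Nat.add_comm]

theorem countzip : ∀ u v : List Char, u.length = v.length →
    (u.zip v).countP (fun p => p.1 != p.2) = miscount u v u.length := by
  intro u
  induction u with
  | nil => intro v h; simp [miscount]
  | cons c u ih =>
    intro v h
    cases v with
    | nil => simp at h
    | cons d v =>
      rw [List.zip_cons_cons, List.countP_cons, List.length_cons, miscount_cons,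
        ih v (by simpa using h)]
      by_cases h : c = d <;> simp [h, Nat.add_comm]

theorem zip_self_count (u : List Char) : (u.zip u).countP (fun p => p.1 != p.2) = 0 := by
  rw [countzip u u rfl]
  exact (miscount_zero_iff u u u.length).mpr (fun k _ => rfl)

theorem zipcount_comm : ∀ u v : List Char,
    (u.zip v).countP (fun p => p.1 != p.2) = (v.zip u).countP (fun p => p.1 != p.2) := by
  intro u
  induction u with
  | nil => intro v; cases v <;> simp
  | cons c u ih =>
    intro v
    cases v with
    | nil => simp
    | cons d v =>
      simp only [List.zip_cons_cons, List.countP_cons, ih v]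
      congr 1
      by_cases h : c = d
      · simp [h]
      · simp [h, Ne.symm h]

theorem delShape_zero (x y : List Char) : delShape x y 0 :=
  ⟨0, le_refl 0, fun k hk => absurd hk (by omega), fun k h1 h2 => absurd h2 (by omega)⟩

theorem agreeTo_symm {x y : List Char} {p : Nat} (h : agreeTo x y p) : agreeTo y x p :=
  fun k hk => (h k hk).symm

theorem miscount_succ (x y : List Char) (i : Nat) :
    miscount x y (i+1) = miscount x y i + (if x.getD i ' ' = y.getD i ' ' then 0 else 1) := by
  unfold miscount
  rw [List.range_succ, List.countP_append]
  by_cases h : x.getD i ' ' = y.getD i ' '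
  · rw [if_pos h]
    rw [List.getD_eq_getElem?_getD, List.getD_eq_getElem?_getD] at h
    simp [h]
  · rw [if_neg h]
    rw [List.getD_eq_getElem?_getD, List.getD_eq_getElem?_getD] at h
    simp [h]

theorem lev_zero (x y : List Char) : ∀ i j, levT x y i j = 0 ↔ i = j ∧ agreeTo x y i := by
  intro i j
  fun_induction levT x y i j with
  | case1 j => simp [agreeTo]; omega
  | case2 i => simp [agreeTo]
  | case3 i j ih1 ih2 ih3 =>
    rw [Nat.min_eq_zero_iff, Nat.min_eq_zero_iff]
    constructor
    · rintro (⟨h | h⟩ | h)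
      · omega
      · omega
      · rcases Nat.add_eq_zero_iff.mp h with ⟨h0, hc⟩
        obtain ⟨rfl, hag⟩ := ih3.mp h0
        have hxy : x.getD i ' ' = y.getD i ' ' := by
          by_contra hne
          rw [if_neg hne] at hc
          exact one_ne_zero hc
        refine ⟨rfl, ?_⟩
        intro k hk
        rcases Nat.lt_succ_iff_lt_or_eq.mp hk with hk' | rfl
        · exact hag k hk'
        · exact hxy
    · rintro ⟨hij, hag⟩
      right
      have hij' : i = j := by omega
      subst hij'
      have : levT x y i i = 0 := ih3.mpr ⟨rfl, fun k hk => hag k (by omega)⟩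
      rw [this, if_pos (hag i (by omega))]

theorem lev_le_one (x y : List Char) : ∀ i j, levT x y i j ≤ 1 ↔
    (i = j ∧ miscount x y i ≤ 1) ∨ (i = j + 1 ∧ delShape x y j) ∨ (j = i + 1 ∧ delShape y x i) := by
  intro i j
  fun_induction levT x y i j with
  | case1 j =>
    constructor
    · intro h
      interval_cases j
      · exact Or.inl ⟨rfl, by simp [miscount]⟩
      · exact Or.inr (Or.inr ⟨rfl, delShape_zero y x⟩)
    · rintro (⟨h, _⟩ | ⟨h, _⟩ | ⟨h, _⟩) <;> omega
  | case2 i =>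
    constructor
    · intro h
      have : i = 0 := by omega
      subst this
      exact Or.inr (Or.inl ⟨rfl, delShape_zero x y⟩)
    · rintro (⟨h, _⟩ | ⟨h, _⟩ | ⟨h, _⟩) <;> omega
  | case3 i j ih1 ih2 ih3 =>
    constructor
    · intro h
      rw [min_le_iff, min_le_iff] at h
      rcases h with (hA | hB) | hC
      · -- levT x y i (j+1) = 0
        have h0 : levT x y i (j+1) = 0 := by omega
        obtain ⟨hij, hag⟩ := (lev_zero x y i (j+1)).mp h0
        refine Or.inr (Or.inl ⟨by omega, ⟨j+1, le_refl _, ?_, ?_⟩⟩)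
        · intro k hk; exact hag k (by omega)
        · intro k h1 h2; exact absurd h2 (by omega)
      · -- levT x y (i+1) j = 0
        have h0 : levT x y (i+1) j = 0 := by omega
        obtain ⟨hij, hag⟩ := (lev_zero x y (i+1) j).mp h0
        refine Or.inr (Or.inr ⟨by omega, ⟨i+1, le_refl _, agreeTo_symm ?_, ?_⟩⟩)
        · intro k hk; exact hag k hk
        · intro k h1 h2; exact absurd h2 (by omega)
      · by_cases hc : x.getD i ' ' = y.getD j ' '
        · rw [if_pos hc] at hC
          have hC' : levT x y i j ≤ 1 := by omega
          rcases ih3.mp hC' with ⟨hij, hm⟩ | ⟨hij, p, hp, hag, hsh⟩ | ⟨hij, p, hp, hag, hsh⟩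
          · subst hij
            refine Or.inl ⟨rfl, ?_⟩
            rw [miscount_succ, if_pos hc]
            omega
          · refine Or.inr (Or.inl ⟨by omega, ⟨p, by omega, hag, ?_⟩⟩)
            intro k h1 h2
            rcases Nat.lt_succ_iff_lt_or_eq.mp h2 with h2' | rfl
            · exact hsh k h1 h2'
            · rw [← hij]; exact hc
          · refine Or.inr (Or.inr ⟨by omega, ⟨p, by omega, hag, ?_⟩⟩)
            intro k h1 h2
            rcases Nat.lt_succ_iff_lt_or_eq.mp h2 with h2' | rfl
            · exact hsh k h1 h2'
            · rw [← hij]; exact hc.symm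
        · rw [if_neg hc] at hC
          have hC0 : levT x y i j = 0 := by omega
          obtain ⟨hij, hag⟩ := (lev_zero x y i j).mp hC0
          subst hij
          refine Or.inl ⟨rfl, ?_⟩
          rw [miscount_succ, if_neg hc, (miscount_zero_iff x y i).mpr hag]
    · rintro (⟨hij, hm⟩ | ⟨hij, p, hp, hag, hsh⟩ | ⟨hij, p, hp, hag, hsh⟩)
      · have hij' : i = j := by omega
        subst hij'
        rw [miscount_succ] at hm
        by_cases hc : x.getD i ' ' = y.getD i ' '
        · rw [if_pos hc] at hm
          have : levT x y i i ≤ 1 := ih3.mpr (Or.inl ⟨rfl, by omega⟩)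
          calc min (min (levT x y i (i+1) + 1) (levT x y (i+1) i + 1))
                (levT x y i i + if x.getD i ' ' = y.getD i ' ' then 0 else 1)
              ≤ levT x y i i + if x.getD i ' ' = y.getD i ' ' then 0 else 1 := min_le_right _ _
            _ ≤ 1 := by rw [if_pos hc]; omega
        · rw [if_neg hc] at hm
          have hm0 : miscount x y i = 0 := by omega
          have h0 : levT x y i i = 0 := (lev_zero x y i i).mpr ⟨rfl, (miscount_zero_iff x y i).mp hm0⟩
          calc min (min (levT x y i (i+1) + 1) (levT x y (i+1) i + 1))
                (levT x y i i + if x.getD i ' ' = y.getD i ' ' then 0 else 1)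
              ≤ levT x y i i + if x.getD i ' ' = y.getD i ' ' then 0 else 1 := min_le_right _ _
            _ ≤ 1 := by rw [if_neg hc, h0]
      · -- i = j + 1 (as i+1 = (j+1)+1), delShape x y (j+1) with witness p
        have hij' : i = j + 1 := by omega
        by_cases hpj : p = j + 1
        · subst hpj
          have h0 : levT x y i (j+1) = 0 :=
            (lev_zero x y i (j+1)).mpr ⟨hij', fun k hk => hag k (by omega)⟩
          calc min (min (levT x y i (j+1) + 1) (levT x y (i+1) j + 1))
                (levT x y i j + if x.getD i ' ' = y.getD j ' ' then 0 else 1)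
              ≤ min (levT x y i (j+1) + 1) (levT x y (i+1) j + 1) := min_le_left _ _
            _ ≤ levT x y i (j+1) + 1 := min_le_left _ _
            _ ≤ 1 := by omega
        · have hple : p ≤ j := by omega
          have hc : x.getD i ' ' = y.getD j ' ' := by
            have := hsh j hple (by omega)
            rwa [← hij'] at this
          have hC : levT x y i j ≤ 1 :=
            ih3.mpr (Or.inr (Or.inl ⟨hij', ⟨p, hple, hag, fun k h1 h2 => hsh k h1 (by omega)⟩⟩))
          calc min (min (levT x y i (j+1) + 1) (levT x y (i+1) j + 1))
                (levT x y i j + if x.getD i ' ' = y.getD j ' ' then 0 else 1)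
              ≤ levT x y i j + if x.getD i ' ' = y.getD j ' ' then 0 else 1 := min_le_right _ _
            _ ≤ 1 := by rw [if_pos hc]; omega
      · -- j = i + 1, delShape y x (i+1) with witness p
        have hij' : j = i + 1 := by omega
        by_cases hpi : p = i + 1
        · subst hpi
          have h0 : levT x y (i+1) j = 0 :=
            (lev_zero x y (i+1) j).mpr ⟨by omega, fun k hk => (hag k (by omega)).symm⟩
          calc min (min (levT x y i (j+1) + 1) (levT x y (i+1) j + 1))
                (levT x y i j + if x.getD i ' ' = y.getD j ' ' then 0 else 1)
              ≤ min (levT x y i (j+1) + 1) (levT x y (i+1) j + 1) := min_le_left _ _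
            _ ≤ levT x y (i+1) j + 1 := min_le_right _ _
            _ ≤ 1 := by omega
        · have hple : p ≤ i := by omega
          have hc : x.getD i ' ' = y.getD j ' ' := by
            have := hsh i hple (by omega)
            rw [← hij'] at this
            exact this.symm
          have hC : levT x y i j ≤ 1 :=
            ih3.mpr (Or.inr (Or.inr ⟨hij', ⟨p, hple, hag, fun k h1 h2 => hsh k h1 (by omega)⟩⟩))
          calc min (min (levT x y i (j+1) + 1) (levT x y (i+1) j + 1))
                (levT x y i j + if x.getD i ' ' = y.getD j ' ' then 0 else 1)
              ≤ levT x y i j + if x.getD i ' ' = y.getD j ' ' then 0 else 1 := min_le_right _ _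
            _ ≤ 1 := by rw [if_pos hc]; omega

theorem delScan_iff : ∀ (y x : List Char), x.length = y.length + 1 →
    (delScan x y = true ↔ delShape x y y.length) := by
  intro y
  induction y with
  | nil =>
    intro x h
    match x, h with
    | [xc], _ =>
      simp only [delScan, List.isEmpty_nil, List.length_nil]
      constructor
      · intro _
        exact ⟨0, le_refl 0, fun k hk => absurd hk (by omega), fun k h1 h2 => absurd h2 (by omega)⟩
      · intro _; trivial
  | cons yc yt ih =>
    intro x h
    match x with
    | xc :: xt =>
      have hlen : xt.length = yt.length + 1 := by simpa using h
      simp only [delScan, List.length_cons]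
      by_cases hxy : xc = yc
      · rw [if_pos hxy, ih xt hlen]
        constructor
        · rintro ⟨p, hp, hag, hsh⟩
          refine ⟨p + 1, by omega, ?_, ?_⟩
          · intro k hk
            cases k with
            | zero => simpa using hxy
            | succ k' =>
              have := hag k' (by omega)
              simpa [List.getD_cons_succ] using this
          · intro k h1 h2
            cases k with
            | zero => omega
            | succ k' =>
              have := hsh k' (by omega) (by omega)
              simpa [List.getD_cons_succ] using this
        · rintro ⟨p, hp, hag, hsh⟩
          -- normalise p to q ≥ 1 (if p = 0 we can upgrade using xc = yc)
          have hshape1 : agreeTo (xc::xt) (yc::yt) 1 := by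
            intro k hk
            have : k = 0 := by omega
            subst this
            simpa using hxy
          obtain ⟨q, hq1, hqle, hqag, hqsh⟩ :
              ∃ q, 1 ≤ q ∧ q ≤ yt.length + 1 ∧ agreeTo (xc::xt) (yc::yt) q ∧
                shiftFrom (xc::xt) (yc::yt) q (yt.length + 1) := by
            cases Nat.eq_zero_or_pos p with
            | inl hp0 =>
              subst hp0
              exact ⟨1, le_refl 1, by omega, hshape1, fun k h1 h2 => hsh k (by omega) h2⟩
            | inr hp1 => exact ⟨p, hp1, hp, hag, hsh⟩
          refine ⟨q - 1, by omega, ?_, ?_⟩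
          · intro k hk
            have := hqag (k+1) (by omega)
            simpa [List.getD_cons_succ] using this
          · intro k h1 h2
            have := hqsh (k+1) (by omega) (by omega)
            simpa [List.getD_cons_succ] using this
      · rw [if_neg hxy]
        constructor
        · intro hb
          have hxt : xt = yc :: yt := by simpa using hb
          subst hxt
          refine ⟨0, by omega, fun k hk => absurd hk (by omega), ?_⟩
          intro k _ h2
          simp
        · rintro ⟨p, hp, hag, hsh⟩
          have hp0 : p = 0 := by
            by_contra hp0
            have := hag 0 (by omega)
            simp at this
            exact hxy this
          subst hp0
          have hxt : xt = yc :: yt := by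
            apply List.ext_getElem (by simpa using h)
            intro k hk1 hk2
            have := hsh k (by omega) (by
              simp only [List.length_cons] at hk2 ⊢
              omega)
            rw [List.getD_cons_succ] at this
            rw [List.getD_eq_getElem xt ' ' hk1, List.getD_eq_getElem (yc::yt) ' ' hk2] at this
            exact this
          simp [hxt]

theorem inner_inv (x y : List Char) (prev : List Int) (i' : Nat) (ca : Char)
    (hca : ca = x.getD i' ' ')
    (hprev : prev = (List.range (y.length+1)).map (fun j => (levT x y i' j : Int))) :
    ∀ (ys : List Char) (t : Nat), ys = y.drop t → t ≤ y.length →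
    (ys.zipIdx (t+1)).foldl (fun cur (qj : Char × Nat) =>
        let ins := PySem.List.pyGetD prev (qj.2 : Int) 0 + 1
        let del := PySem.List.pyGetD cur ((qj.2 : Int) - 1) 0 + 1
        let sub := PySem.List.pyGetD prev ((qj.2 : Int) - 1) 0 +
          (if ca ≠ qj.1 then 1 else 0)
        cur ++ [min (min ins del) sub])
      ((List.range (t+1)).map (fun j => (levT x y (i'+1) j : Int)))
    = (List.range (y.length+1)).map (fun j => (levT x y (i'+1) j : Int)) := by
  intro ys
  induction ys with
  | nil =>
    intro t ht htle
    have : y.length = t := by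
      have := List.drop_eq_nil_iff.mp ht.symm
      omega
    subst this
    simp
  | cons cb ys' ih =>
    intro t ht htle
    have hlt : t < y.length := by
      by_contra hc
      have : y.drop t = [] := List.drop_eq_nil_iff.mpr (by omega)
      rw [← ht] at this
      simp at this
    have hcb : y[t]? = some cb := by
      have h0 : (y.drop t)[0]? = y[t + 0]? := List.getElem?_drop
      rw [← ht] at h0
      simpa using h0.symm
    have hcbD : y.getD t ' ' = cb := by
      rw [List.getD_eq_getElem?_getD, hcb]; rfl
    have hys' : ys' = y.drop (t+1) := by
      have h1 : (y.drop t).drop 1 = y.drop (t+1) := List.drop_drop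
      rw [← ht] at h1
      simpa using h1
    rw [List.zipIdx_cons, List.foldl_cons]
    have hcast : (((t+1 : Nat) : Int)) - 1 = ((t : Nat) : Int) := by push_cast; ring
    have hstep :
        (fun cur (qj : Char × Nat) =>
          let ins := PySem.List.pyGetD prev (qj.2 : Int) 0 + 1
          let del := PySem.List.pyGetD cur ((qj.2 : Int) - 1) 0 + 1
          let sub := PySem.List.pyGetD prev ((qj.2 : Int) - 1) 0 +
            (if ca ≠ qj.1 then 1 else 0)
          cur ++ [min (min ins del) sub])
          ((List.range (t+1)).map (fun j => (levT x y (i'+1) j : Int))) (cb, t+1)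
        = (List.range (t+1+1)).map (fun j => (levT x y (i'+1) j : Int)) := by
      show (List.range (t+1)).map (fun j => (levT x y (i'+1) j : Int)) ++ [_] = _
      rw [List.range_succ (n := t+1), List.map_append]
      congr 1
      simp only [List.map_cons, List.map_nil]
      congr 1
      -- the appended cell equals levT x y (i'+1) (t+1)
      rw [hprev, hcast, PySem.List.pyGetD_natCast, PySem.List.pyGetD_natCast,
        PySem.List.pyGetD_natCast,
        PySem.List.getD_map_range _ _ _ _ (by omega),
        PySem.List.getD_map_range _ _ _ _ (by omega),
        PySem.List.getD_map_range _ _ _ _ (by omega)]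
      have hcost : (if ca ≠ cb then (1:Int) else 0)
          = ((if x.getD i' ' ' = y.getD t ' ' then 0 else 1 : Nat) : Int) := by
        rw [hca, hcbD]
        rcases eq_or_ne (x.getD i' ' ') cb with h | h
        · rw [if_pos h, if_neg (not_not_intro h)]; rfl
        · rw [if_neg h, if_pos h]; rfl
      rw [hcost]
      conv_rhs => rw [levT]
      push_cast [Nat.cast_min]
      rfl
    refine Eq.trans ?_ (ih (t+1) hys' (by omega))
    exact congrFun (congrArg _ hstep) _

theorem outer_inv (x y : List Char) :
    ∀ (xs : List Char) (s : Nat) (prev : List Int), xs = x.drop s → s ≤ x.length →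
    prev = (List.range (y.length+1)).map (fun j => (levT x y s j : Int)) →
    (xs.zipIdx (s+1)).foldl (fun prev (pi : Char × Nat) =>
      (y.zipIdx 1).foldl (fun cur (qj : Char × Nat) =>
        let ins := PySem.List.pyGetD prev (qj.2 : Int) 0 + 1
        let del := PySem.List.pyGetD cur ((qj.2 : Int) - 1) 0 + 1
        let sub := PySem.List.pyGetD prev ((qj.2 : Int) - 1) 0 +
          (if pi.1 ≠ qj.1 then 1 else 0)
        cur ++ [min (min ins del) sub]) [(pi.2 : Int)]) prev
    = (List.range (y.length+1)).map (fun j => (levT x y x.length j : Int)) := by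
  intro xs
  induction xs with
  | nil =>
    intro s prev hs hsle hprev
    have : x.length = s := by
      have := List.drop_eq_nil_iff.mp hs.symm
      omega
    subst this
    simpa using hprev
  | cons ca xs' ih =>
    intro s prev hs hsle hprev
    have hlt : s < x.length := by
      by_contra hc
      have : x.drop s = [] := List.drop_eq_nil_iff.mpr (by omega)
      rw [← hs] at this
      simp at this
    have hcaE : x[s]? = some ca := by
      have h0 : (x.drop s)[0]? = x[s + 0]? := List.getElem?_drop
      rw [← hs] at h0
      simpa using h0.symm
    have hcaD : ca = x.getD s ' ' := by
      rw [List.getD_eq_getElem?_getD, hcaE]; rfl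
    have hxs' : xs' = x.drop (s+1) := by
      have h1 : (x.drop s).drop 1 = x.drop (s+1) := List.drop_drop
      rw [← hs] at h1
      simpa using h1
    rw [List.zipIdx_cons, List.foldl_cons]
    refine Eq.trans ?_ (ih (s+1) _ hxs' (by omega) rfl)
    have hinner := inner_inv x y prev s ca hcaD hprev y 0 rfl (by omega)
    have hinit : [((s+1 : Nat) : Int)] = (List.range (0+1)).map (fun j => (levT x y (s+1) j : Int)) := by
      simp [levT]
    have haccum : (y.zipIdx 1).foldl (fun cur (qj : Char × Nat) =>
        let ins := PySem.List.pyGetD prev (qj.2 : Int) 0 + 1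
        let del := PySem.List.pyGetD cur ((qj.2 : Int) - 1) 0 + 1
        let sub := PySem.List.pyGetD prev ((qj.2 : Int) - 1) 0 +
          (if ca ≠ qj.1 then 1 else 0)
        cur ++ [min (min ins del) sub]) [((s+1 : Nat) : Int)]
        = (List.range (y.length+1)).map (fun j => (levT x y (s+1) j : Int)) := by
      rw [hinit]
      exact hinner
    exact congrArg (fun acc => List.foldl _ acc (xs'.zipIdx (s+1+1))) haccum

theorem dp_eq (x y : List Char) :
    PySem.List.pyGetD
      ((x.zipIdx 1).foldl (fun prev (pi : Char × Nat) =>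
        (y.zipIdx 1).foldl (fun cur (qj : Char × Nat) =>
          let ins := PySem.List.pyGetD prev (qj.2 : Int) 0 + 1
          let del := PySem.List.pyGetD cur ((qj.2 : Int) - 1) 0 + 1
          let sub := PySem.List.pyGetD prev ((qj.2 : Int) - 1) 0 +
            (if pi.1 ≠ qj.1 then 1 else 0)
          cur ++ [min (min ins del) sub]) [(pi.2 : Int)])
        (PySem.List.pyRange 0 (PySem.List.len y + 1) 1)) (-1) 0
    = (levT x y x.length y.length : Int) := by
  have hrow0 : PySem.List.pyRange 0 (PySem.List.len y + 1) 1
      = (List.range (y.length+1)).map (fun j => (levT x y 0 j : Int)) := by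
    rw [PySem.List.len_eq, PySem.List.pyRange_one]
    have h1 : ((y.length : Int) + 1 - 0).toNat = y.length + 1 := by omega
    rw [h1]
    apply List.map_congr_left
    intro k hk
    simp [levT]
  have houter := outer_inv x y x 0 _ rfl (by omega) rfl
  simp only [Nat.zero_add] at houter
  rw [hrow0, houter, List.range_succ, List.map_append, List.map_singleton,
    PySem.List.pyGetD_neg_one_append_singleton]

theorem lev_one_eqlen (x y : List Char) (h : x.length = y.length) :
    (levT x y x.length y.length = 1) ↔ ((x.zip y).countP (fun p => p.1 != p.2) = 1) := by
  have hle := lev_le_one x y x.length y.length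
  have hz := lev_zero x y x.length y.length
  rw [countzip x y h]
  constructor
  · intro h1
    rcases hle.mp (by omega) with ⟨_, hm⟩ | ⟨hj, _⟩ | ⟨hj, _⟩
    · have hne : miscount x y x.length ≠ 0 := by
        intro hm0
        have h0 : levT x y x.length y.length = 0 :=
          hz.mpr ⟨h, (miscount_zero_iff x y x.length).mp hm0⟩
        omega
      omega
    · omega
    · omega
  · intro hm
    have hle1 : levT x y x.length y.length ≤ 1 := hle.mpr (Or.inl ⟨h, by omega⟩)
    have hne0 : levT x y x.length y.length ≠ 0 := by
      intro h0
      have := (miscount_zero_iff x y x.length).mpr (hz.mp h0).2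
      omega
    omega

theorem lev_one_del (x y : List Char) (h : x.length = y.length + 1) :
    (levT x y x.length y.length = 1) ↔ delScan x y = true := by
  rw [delScan_iff y x h]
  have hle := lev_le_one x y x.length y.length
  have hz := lev_zero x y x.length y.length
  constructor
  · intro h1
    rcases hle.mp (by omega) with ⟨hj, _⟩ | ⟨_, hd⟩ | ⟨hj, _⟩
    · omega
    · exact hd
    · omega
  · intro hd
    have hle1 : levT x y x.length y.length ≤ 1 := hle.mpr (Or.inr (Or.inl ⟨h, hd⟩))
    have hne0 : levT x y x.length y.length ≠ 0 := by
      intro h0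
      have := (hz.mp h0).1
      omega
    omega

theorem lev_one_ins (x y : List Char) (h : y.length = x.length + 1) :
    (levT x y x.length y.length = 1) ↔ delScan y x = true := by
  rw [delScan_iff x y h]
  have hle := lev_le_one x y x.length y.length
  have hz := lev_zero x y x.length y.length
  constructor
  · intro h1
    rcases hle.mp (by omega) with ⟨hj, _⟩ | ⟨hj, _⟩ | ⟨_, hd⟩
    · omega
    · omega
    · exact hd
  · intro hd
    have hle1 : levT x y x.length y.length ≤ 1 := hle.mpr (Or.inr (Or.inr ⟨h, hd⟩))
    have hne0 : levT x y x.length y.length ≠ 0 := by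
      intro h0
      have := (hz.mp h0).1
      omega
    omega

theorem lev_one_far (x y : List Char) (h1 : x.length ≠ y.length) (h2 : x.length ≠ y.length + 1)
    (h3 : y.length ≠ x.length + 1) : levT x y x.length y.length ≠ 1 := by
  intro h
  rcases (lev_le_one x y x.length y.length).mp (by omega) with ⟨hj, _⟩ | ⟨hj, _⟩ | ⟨hj, _⟩ <;> omega

theorem lev_one_iff_oneEdit (u v : List Char) :
    (levT u v u.length v.length = 1) ↔ oneEditAway u v = true := by
  unfold oneEditAway
  by_cases h1 : u.length = v.length
  · rw [if_pos h1, lev_one_eqlen u v h1]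
    simp
  · rw [if_neg h1]
    by_cases h2 : u.length = v.length + 1
    · rw [if_pos h2]
      exact lev_one_del u v h2
    · rw [if_neg h2]
      by_cases h3 : v.length = u.length + 1
      · rw [if_pos h3]
        exact lev_one_ins u v h3
      · rw [if_neg h3]
        exact iff_of_false (lev_one_far u v h1 h2 h3) (by simp)

theorem oneEdit_comm (u v : List Char) : oneEditAway u v = oneEditAway v u := by
  unfold oneEditAway
  by_cases h1 : u.length = v.length
  · rw [if_pos h1, if_pos h1.symm, zipcount_comm]
  · rw [if_neg h1, if_neg (Ne.symm h1)]
    by_cases h2 : u.length = v.length + 1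
    · rw [if_pos h2, if_neg (by omega), if_pos h2]
    · rw [if_neg h2]
      by_cases h3 : v.length = u.length + 1
      · rw [if_pos h3, if_pos h3]
      · rw [if_neg h3, if_neg h3, if_neg h2]

theorem bLeet_getD (c : Char) : bLeet.getD c c = leetChar c := by
  by_cases h0 : c = '0'; · subst h0; decide
  by_cases h1 : c = '1'; · subst h1; decide
  by_cases h3 : c = '3'; · subst h3; decide
  by_cases h4 : c = '4'; · subst h4; decide
  by_cases h5 : c = '5'; · subst h5; decide
  by_cases h7 : c = '7'; · subst h7; decide
  by_cases hd : c = '$'; · subst hd; decide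
  by_cases ha : c = '@'; · subst ha; decide
  have hleet : leetChar c = c := by
    unfold leetChar
    rw [if_neg h0, if_neg h1, if_neg h3, if_neg h4, if_neg h5, if_neg h7, if_neg hd, if_neg ha]
  rw [hleet]
  have hmk : bLeet = PySem.Dict.mk [('0','o'),('1','l'),('3','e'),('4','a'),('5','s'),('7','t'),('$','s'),('@','a')] := rfl
  rw [hmk, PySem.Dict.getD_eq_get?_getD]
  simp [PySem.Dict.get?_mk_cons, Ne.symm h0, Ne.symm h1, Ne.symm h3, Ne.symm h4,
    Ne.symm h5, Ne.symm h7, Ne.symm hd, Ne.symm ha]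
  rfl

theorem norm_eq (s : String) : bNormalize s = normalize_leetspeak s := by
  unfold bNormalize normalize_leetspeak
  congr 1
  apply List.map_congr_left
  intro c _
  exact bLeet_getD c

theorem lowerChar_not_upper (c : Char) : PySem.Chars.isupper (PySem.Chars.lowerChar c) = false := by
  unfold PySem.Chars.lowerChar
  by_cases h : PySem.Chars.isupper c
  · rw [if_pos h]
    unfold PySem.Chars.isupper at *
    simp only [Bool.and_eq_true, decide_eq_true_eq] at h
    have h1 : 65 ≤ c.toNat := by simpa [Char.le_def, UInt32.le_iff_toNat_le] using h.1
    have h2 : c.toNat ≤ 90 := by simpa [Char.le_def, UInt32.le_iff_toNat_le] using h.2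
    have hv : (c.toNat + 32).isValidChar := Or.inl (by omega)
    have htn : (Char.ofNat (c.toNat + 32)).toNat = c.toNat + 32 := by
      unfold Char.ofNat
      rw [dif_pos hv]
      exact Char.toNat_ofNatAux hv
    simp only [Bool.and_eq_false_iff, decide_eq_false_iff_not]
    right
    intro hle
    have : (Char.ofNat (c.toNat + 32)).toNat ≤ 90 := by
      simpa [Char.le_def, UInt32.le_iff_toNat_le] using hle
    omega
  · rw [if_neg h]
    simpa using h

theorem lowerChar_of_not_upper {c : Char} (h : PySem.Chars.isupper c = false) :
    PySem.Chars.lowerChar c = c := by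
  unfold PySem.Chars.lowerChar
  rw [if_neg (by simp [h])]

theorem leetChar_not_upper {c : Char} (h : PySem.Chars.isupper c = false) :
    PySem.Chars.isupper (leetChar c) = false := by
  unfold leetChar
  split_ifs <;> first | decide | exact h

theorem lower_normalize (s : String) :
    PySem.Str.lower (normalize_leetspeak s) = normalize_leetspeak s := by
  apply String.toList_inj.mp
  rw [PySem.Str.toList_lower]
  unfold normalize_leetspeak
  rw [String.toList_ofList, PySem.Str.toList_lower]
  unfold PySem.Chars.lower
  rw [List.map_map, List.map_map, List.map_map]
  apply List.map_congr_left
  intro c _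
  show PySem.Chars.lowerChar (leetChar (PySem.Chars.lowerChar c)) = leetChar (PySem.Chars.lowerChar c)
  exact lowerChar_of_not_upper (leetChar_not_upper (lowerChar_not_upper c))

theorem ed_one_iff (nm brand : String) (hlow : PySem.Str.lower nm = nm) :
    (edit_distance nm brand = 1) ↔ oneEditAway nm.toList (PySem.Str.lower brand).toList = true := by
  unfold edit_distance
  rw [hlow]
  by_cases heq : nm = PySem.Str.lower brand
  · rw [if_pos heq, ← heq]
    constructor
    · intro h; exact absurd h (by norm_num)
    · intro h
      exfalso
      unfold oneEditAway at h
      rw [if_pos rfl] at h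
      simp [zip_self_count] at h
  · rw [if_neg heq]
    by_cases hsw : PySem.Str.len nm < PySem.Str.len (PySem.Str.lower brand)
    · rw [if_pos hsw]
      rw [dp_eq (PySem.Str.lower brand).toList nm.toList]
      rw [oneEdit_comm]
      rw [← lev_one_iff_oneEdit (PySem.Str.lower brand).toList nm.toList]
      constructor
      · intro h; exact_mod_cast h
      · intro h; exact_mod_cast congrArg (Nat.cast : Nat → Int) h
    · rw [if_neg hsw]
      rw [dp_eq nm.toList (PySem.Str.lower brand).toList]
      rw [← lev_one_iff_oneEdit nm.toList (PySem.Str.lower brand).toList]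
      constructor
      · intro h; exact_mod_cast h
      · intro h; exact_mod_cast congrArg (Nat.cast : Nat → Int) h

theorem loop_eq (nm root : String) (hlow : PySem.Str.lower nm = nm) :
    ∀ bs, loopA nm root bs = loopB nm root bs := by
  intro bs
  induction bs with
  | nil => rfl
  | cons brand rest ih =>
    simp only [loopA, loopB]
    by_cases hb : nm = brand
    · rw [if_pos hb, if_pos hb]
    · rw [if_neg hb, if_neg hb]
      have hcond : (edit_distance nm brand = 1 ∧ nm ≠ brand) ↔
          (oneEditAway nm.toList (PySem.Str.lower brand).toList = true) := by
        rw [← ed_one_iff nm brand hlow]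
        exact ⟨fun h => h.1, fun h => ⟨h, hb⟩⟩
      by_cases hc : edit_distance nm brand = 1 ∧ nm ≠ brand
      · rw [if_pos hc, if_pos (hcond.mp hc)]
      · rw [if_neg hc, if_neg (fun hh => hc (hcond.mpr hh)), ih]

-- ===== VERDICT (by name: the statement is the Claim_ definition above) =====
theorem is_typosquatting_spec : Claim_equal_is_typosquatting := by
  intro hostname brands _
  unfold Spec_is_typosquatting is_typosquatting is_typosquatting_alt
  by_cases h2 : ((PySem.Str.split? (PySem.Str.lower hostname) ".").getD []).length < 2
  · rw [if_pos h2, if_pos h2]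
  · rw [if_neg h2, if_neg h2]
    show loopA (normalize_leetspeak ((PySem.List.pyGet? ((PySem.Str.split? (PySem.Str.lower hostname) ".").getD []) (-2)).getD ""))
        ((PySem.List.pyGet? ((PySem.Str.split? (PySem.Str.lower hostname) ".").getD []) (-2)).getD "") brands
      = loopB (bNormalize ((PySem.List.pyGet? ((PySem.Str.split? (PySem.Str.lower hostname) ".").getD []) (-2)).getD ""))
        ((PySem.List.pyGet? ((PySem.Str.split? (PySem.Str.lower hostname) ".").getD []) (-2)).getD "") brands
    rw [norm_eq]
    exact loop_eq _ _ (lower_normalize _) brands
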